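-- pv_equiv track=rewrite | github.com/christosMil/python-script-for-latex-abbreviations | acronyms.py | format_acronyms
-- ===== SOURCE A (Python) =====
-- def format_acronyms(abbreviations):
--     '''
--     Creates the string that contains all the acronyms formatted for the
--     output file. Two reasons to do this:
--     1. Write in one passage to the file, in the next block of commands.
--     2. Find the longest acronym label, to use it foralignment.
--     '''
--     acronyms = ""
--     max_acronym_label = ""
--     for abbreviation in abbreviations:
--         new_line = abbreviation.split(" ", 1)
--         if len(max_acronym_label) < len(new_line[0]):
--             max_acronym_label = new_line[0]
--         acronyms += f"\\acro{{{new_line[0]}}}{{{new_line[1]}}}\n"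
--
--     return acronyms, max_acronym_label
-- ===== SOURCE B (Python) =====
-- def format_acronyms(abbreviations):
--     '''
--     Same result by divide and conquer: recursively format the two halves
--     of the list and merge — concatenate the blocks and keep the left
--     half's best label on ties (== the original's first-longest rule).
--     '''
--     def solve(lo, hi):
--         if hi - lo == 1:
--             label, expansion = abbreviations[lo].split(" ", 1)
--             return f"\\acro{{{label}}}{{{expansion}}}\n", label
--         mid = (lo + hi) // 2
--         left_acros, left_best = solve(lo, mid)
--         right_acros, right_best = solve(mid, hi)
--         best = left_best if len(left_best) >= len(right_best) else right_best
--         return left_acros + right_acros, best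
--
--     if not abbreviations:
--         return "", ""
--     return solve(0, len(abbreviations))
-- ===== Notes on version B (the rewrite author's own statement) =====
-- stated objective: alternative
-- what changed: Replaces A's single left-to-right accumulating loop by a divide-and-conquer recursion: each half of the list is formatted independently and the results are merged (block concatenation plus a left-wins-ties longest-label merge).
import Mathlib
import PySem

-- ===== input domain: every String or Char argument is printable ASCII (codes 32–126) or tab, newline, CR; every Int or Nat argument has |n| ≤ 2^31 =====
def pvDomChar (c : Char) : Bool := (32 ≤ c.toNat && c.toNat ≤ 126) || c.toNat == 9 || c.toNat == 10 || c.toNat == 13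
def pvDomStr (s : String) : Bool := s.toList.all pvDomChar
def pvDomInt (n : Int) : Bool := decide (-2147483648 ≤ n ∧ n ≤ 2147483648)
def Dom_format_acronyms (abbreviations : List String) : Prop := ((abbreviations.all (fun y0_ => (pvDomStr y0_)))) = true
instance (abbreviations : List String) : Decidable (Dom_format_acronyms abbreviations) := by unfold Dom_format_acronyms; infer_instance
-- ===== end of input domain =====

-- B replaces A's single accumulating loop by a divide-and-conquer recursion over the
-- list, merging half-results (objective: alternative, not faster).

-- ===== PORT A =====
-- one loop carrying (acronyms, max_acronym_label); new_line[1] raises IndexError on a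
-- space-less entry (excluded by Pre_), ported as pyGet? with getD "".
def format_acronyms (abbreviations : List String) : String × String :=
  abbreviations.foldl
    (fun st abbreviation =>
      let new_line := (PySem.Str.splitMax? abbreviation " " 1).getD []
      let f0 := (PySem.List.pyGet? new_line 0).getD ""
      let f1 := (PySem.List.pyGet? new_line 1).getD ""
      let max_acronym_label :=
        if PySem.Str.len st.2 < PySem.Str.len f0 then f0 else st.2
      (st.1 ++ ("\\acro{" ++ f0 ++ "}{" ++ f1 ++ "}\n"), max_acronym_label))
    ("", "")

-- ===== PORT B =====
-- base case: format one entry (label, expansion unpack raises ValueError on a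
-- space-less entry, excluded by Pre_; ported as pyGet? with getD "").
def fa_single (a : String) : String × String :=
  let parts := (PySem.Str.splitMax? a " " 1).getD []
  let label := (PySem.List.pyGet? parts 0).getD ""
  let expansion := (PySem.List.pyGet? parts 1).getD ""
  ("\\acro{" ++ label ++ "}{" ++ expansion ++ "}\n", label)

-- merge of two half-results: concatenate blocks, keep left best label on ties
def fa_comb (p q : String × String) : String × String :=
  (p.1 ++ q.1, if PySem.Str.len q.2 ≤ PySem.Str.len p.2 then p.2 else q.2)

-- Python's solve(lo, hi) works on the slice abbreviations[lo:hi]; ported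
-- structurally as the sublist itself, with mid = (lo+hi)//2 becoming take/drop
-- at length/2 (exact: same split point, same recursion tree).
def fa_solve (xs : List String) : String × String :=
  match xs with
  | [] => ("", "")          -- unreachable: Python only calls solve on nonempty ranges
  | [a] => fa_single a
  | x :: y :: rest =>
      let xs' := x :: y :: rest
      let mid := xs'.length / 2
      fa_comb (fa_solve (xs'.take mid)) (fa_solve (xs'.drop mid))
termination_by xs.length
decreasing_by
  · simp only [List.length_take, List.length_cons]; omega
  · simp only [List.length_drop, List.length_cons]; omega

def format_acronyms_alt (abbreviations : List String) : String × String :=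
  match abbreviations with
  | [] => ("", "")
  | _ => fa_solve abbreviations

-- ===== PRECONDITION & SPEC =====
-- Pre_: every entry contains a space; on a space-less entry both Python A (IndexError)
-- and Python B (ValueError on unpacking) raise.
def Pre_format_acronyms (abbreviations : List String) : Prop :=
  ∀ a ∈ abbreviations, (' ' : Char) ∈ a.toList
instance (abbreviations : List String) : Decidable (Pre_format_acronyms abbreviations) := by
  unfold Pre_format_acronyms; infer_instance
def pvWitness_format_acronyms : List String := ["ML machine learning", "AI artificial intelligence"]

def Spec_format_acronyms (abbreviations : List String) (out : String × String) : Prop := out = format_acronyms_alt abbreviations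
instance (abbreviations : List String) (out : String × String) : Decidable (Spec_format_acronyms abbreviations out) := by unfold Spec_format_acronyms; infer_instance

-- ===== CLAIM (what is proved, stated in full; the proofs are below) =====
def Claim_equal_format_acronyms : Prop := ∀ (abbreviations : List String), Dom_format_acronyms abbreviations → Pre_format_acronyms abbreviations → Spec_format_acronyms abbreviations (format_acronyms abbreviations)

-- ===== LEMMAS AND PROOFS =====

-- A's loop body as a named step function
def fa_step (st : String × String) (a : String) : String × String :=
  let new_line := (PySem.Str.splitMax? a " " 1).getD []
  let f0 := (PySem.List.pyGet? new_line 0).getD ""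
  let f1 := (PySem.List.pyGet? new_line 1).getD ""
  (st.1 ++ ("\\acro{" ++ f0 ++ "}{" ++ f1 ++ "}\n"),
   if PySem.Str.len st.2 < PySem.Str.len f0 then f0 else st.2)

theorem fa_A_eq_foldl (xs : List String) :
    format_acronyms xs = xs.foldl fa_step ("", "") := rfl

theorem pv_len_zero (l : String) (h : ¬ (0 : Int) < PySem.Str.len l) : l = "" := by
  simp [PySem.Str.len] at h; exact h

-- stepping from the empty state produces exactly the single-entry result
theorem fa_step_empty (a : String) : fa_step ("", "") a = fa_single a := by
  unfold fa_step fa_single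
  dsimp only
  rw [Prod.mk.injEq]
  refine ⟨by simp, ?_⟩
  simp only [PySem.Str.len]
  split_ifs with h
  · rfl
  · exact (pv_len_zero _ (by simpa [PySem.Str.len] using h)).symm

-- merge is associative
theorem fa_comb_assoc (u v w : String × String) :
    fa_comb (fa_comb u v) w = fa_comb u (fa_comb v w) := by
  unfold fa_comb
  dsimp only
  rw [Prod.mk.injEq]
  refine ⟨by rw [String.append_assoc], ?_⟩
  simp only [PySem.Str.len]
  split_ifs <;> first | rfl | omega

-- the empty result is a right identity for the merge
theorem fa_comb_empty (s : String × String) : fa_comb s ("", "") = s := by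
  unfold fa_comb
  dsimp only
  rw [if_pos (by simp [PySem.Str.len])]
  simp

-- one loop step from state s = merge of s with the single-entry result
theorem fa_step_eq_comb (s : String × String) (a : String) :
    fa_step s a = fa_comb s (fa_single a) := by
  unfold fa_step fa_comb fa_single
  dsimp only
  rw [Prod.mk.injEq]
  refine ⟨rfl, ?_⟩
  simp only [PySem.Str.len]
  split_ifs <;> first | rfl | omega

-- homomorphism: folding from state s = merge of s with the fold from the identity
theorem fa_foldl_hom (xs : List String) (s : String × String) :
    xs.foldl fa_step s = fa_comb s (xs.foldl fa_step ("", "")) := by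
  induction xs generalizing s with
  | nil => simp [List.foldl_nil, fa_comb_empty]
  | cons a t ih =>
    simp only [List.foldl_cons]
    rw [ih (fa_step s a), ih (fa_step ("", "") a), fa_step_eq_comb s a,
      fa_step_empty, fa_comb_assoc]

-- the divide-and-conquer recursion computes A's fold on every nonempty list
theorem fa_solve_eq_foldl (xs : List String) (hne : xs ≠ []) :
    fa_solve xs = xs.foldl fa_step ("", "") := by
  induction hn : xs.length using Nat.strong_induction_on generalizing xs with
  | _ n ih =>
    match xs, hne with
    | [a], _ =>
      rw [fa_solve]
      simp [List.foldl_cons, List.foldl_nil, fa_step_empty]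
    | x :: y :: rest, _ =>
      rw [fa_solve]
      set xs' : List String := x :: y :: rest with hxs
      set mid := xs'.length / 2 with hmid
      have hlen : 2 ≤ xs'.length := by simp [hxs]
      have hmid1 : 1 ≤ mid := by omega
      have hmidlt : mid < xs'.length := by omega
      have htake : (xs'.take mid).length = mid := by
        simp [List.length_take]; omega
      have hdrop : (xs'.drop mid).length = xs'.length - mid := by
        simp [List.length_drop]
      have ht := ih (xs'.take mid).length (by omega) (xs'.take mid)
        (by intro h; rw [h] at htake; simp at htake; omega) rfl
      have hd := ih (xs'.drop mid).length (by omega) (xs'.drop mid)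
        (by intro h; rw [h] at hdrop; simp at hdrop; omega) rfl
      rw [ht, hd, ← fa_foldl_hom, ← List.foldl_append, List.take_append_drop]

-- ===== VERDICT (by name: the statement is the Claim_ definition above) =====
theorem format_acronyms_spec : Claim_equal_format_acronyms := by
  intro abbreviations _ _
  unfold Spec_format_acronyms
  cases habb : abbreviations with
  | nil => rfl
  | cons x t =>
    rw [fa_A_eq_foldl]
    show (x :: t).foldl fa_step ("", "") = format_acronyms_alt (x :: t)
    unfold format_acronyms_alt
    rw [fa_solve_eq_foldl (x :: t) (by simp)]
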